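-- pv_equiv track=rewrite | github.com/yennanliu/CS_basics | leetcode_python/Hash_table/isomorphic-strings.py | halfIsom
-- ===== SOURCE A (Python) =====
-- def halfIsom(s, t):
--     lookup = {}
--     for i in range(len(s)):
--         if s[i] not in lookup:
--             lookup[s[i]] = t[i]
--         elif lookup[s[i]] != t[i]:
--             return False
--     return True
-- ===== SOURCE B (Python) =====
-- def halfIsom(s, t):
--     return len({(s[i], t[i]) for i in range(len(s))}) == len(set(s))
-- ===== Notes on version B (the rewrite author's own statement) =====
-- stated objective: idiomatic
-- what changed: Replaces the stateful dict loop with early return by a single set comprehension: the mapping is consistent iff the set of (s[i],t[i]) pairs has the same cardinality as the set of distinct characters of s.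
-- outside the precondition, e.g. on halfIsom('aab', 'ax'): A returns False, B raises IndexError
import Mathlib
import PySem

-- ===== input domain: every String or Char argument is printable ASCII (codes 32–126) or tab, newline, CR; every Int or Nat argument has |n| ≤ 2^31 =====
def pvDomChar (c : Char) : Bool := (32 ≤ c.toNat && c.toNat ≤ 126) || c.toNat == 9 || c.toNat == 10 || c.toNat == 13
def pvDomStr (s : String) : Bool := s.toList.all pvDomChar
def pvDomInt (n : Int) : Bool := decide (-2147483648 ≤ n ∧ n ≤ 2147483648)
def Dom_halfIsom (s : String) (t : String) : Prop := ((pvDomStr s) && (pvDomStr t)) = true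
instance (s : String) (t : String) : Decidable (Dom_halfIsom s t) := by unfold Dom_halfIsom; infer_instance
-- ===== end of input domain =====

-- B replaces A's stateful dict loop by the idiomatic cardinality test |{(s[i],t[i])}| == |set(s)| (same O(n) cost).
-- Pre_ excludes len(s) > len(t): there A raises IndexError except when an earlier inconsistency already returned False,
-- while B's comprehension (which visits every index of s) raises IndexError on all such inputs.


-- ===== PORT A =====
-- loop 'for i in range(len(s))' walking s and t together; under Pre_ (len s ≤ len t) t never runs out;
-- the '[]' branch for t is where Python raises IndexError (outside Pre_).
def halfIsomGo : List Char → List Char → PySem.Dict Char Char → Bool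
  | [], _, _ => true
  | _ :: _, [], _ => false          -- Python: IndexError on t[i]; excluded by Pre_
  | c :: cs, d :: ds, lookup =>
      match lookup.get? c with
      | none => halfIsomGo cs ds (lookup.insert c d)      -- s[i] not in lookup
      | some v => if v ≠ d then false else halfIsomGo cs ds lookup

def halfIsom (s : String) (t : String) : Bool :=
  halfIsomGo s.toList t.toList PySem.Dict.empty

-- ===== PORT B =====
-- len({(s[i], t[i]) for i in range(len(s))}) == len(set(s)); getD's default is only read outside Pre_ (where B raises).
def halfIsom_alt (s : String) (t : String) : Bool :=
  let ss := s.toList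
  let ts := t.toList
  let pairs : PySem.Set (Char × Char) :=
    PySem.Set.ofList ((List.range ss.length).map (fun i => (ss.getD i ' ', ts.getD i ' ')))
  PySem.Set.len pairs == PySem.Set.len (PySem.Set.ofList ss)

-- ===== PRECONDITION & SPEC =====
-- Pre_ excludes len(s) > len(t): A raises IndexError there unless an earlier mismatch returns False, and B raises on all such inputs.
def Pre_halfIsom (s : String) (t : String) : Prop := s.toList.length ≤ t.toList.length
instance (s : String) (t : String) : Decidable (Pre_halfIsom s t) := by unfold Pre_halfIsom; infer_instance
def pvWitness_halfIsom : String × String := ("ab", "cd")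

def Spec_halfIsom (s : String) (t : String) (out : Bool) : Prop := out = halfIsom_alt s t
instance (s : String) (t : String) (out : Bool) : Decidable (Spec_halfIsom s t out) := by unfold Spec_halfIsom; infer_instance

-- ===== CLAIM (what is proved, stated in full; the proofs are below) =====
def Claim_equal_halfIsom : Prop := ∀ (s : String) (t : String), Dom_halfIsom s t → Pre_halfIsom s t → Spec_halfIsom s t (halfIsom s t)

-- ===== LEMMAS AND PROOFS =====

-- A list of pairs is a consistent (functional) mapping
def OkMap (L : List (Char × Char)) : Prop := ∀ p ∈ L, ∀ q ∈ L, p.1 = q.1 → p.2 = q.2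

theorem okMap_congr {L M : List (Char × Char)} (h : ∀ x, x ∈ L ↔ x ∈ M) : OkMap L ↔ OkMap M := by
  unfold OkMap
  constructor
  · intro hk p hp q hq; exact hk p ((h p).mpr hp) q ((h q).mpr hq)
  · intro hk p hp q hq; exact hk p ((h p).mp hp) q ((h q).mp hq)

theorem okMap_items {d : PySem.Dict Char Char} (hnd : d.keys.Nodup) : OkMap d.items := by
  rintro ⟨k, v⟩ hp ⟨k', v'⟩ hq h1
  simp only at h1 ⊢
  subst h1
  have h2 := PySem.Dict.get?_of_mem_items d hp hnd
  have h3 := PySem.Dict.get?_of_mem_items d hq hnd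
  rw [h2] at h3
  exact Option.some_inj.mp h3

theorem halfIsomGo_iff (cs ds : List Char) (d : PySem.Dict Char Char)
    (hlen : cs.length ≤ ds.length) (hnd : d.keys.Nodup) :
    halfIsomGo cs ds d = true ↔ OkMap (d.items ++ cs.zip ds) := by
  induction cs generalizing ds d with
  | nil =>
      simp only [halfIsomGo, List.zip_nil_left, List.append_nil, true_iff]
      exact okMap_items hnd
  | cons c cs ih =>
      cases ds with
      | nil => simp at hlen
      | cons e ds =>
          simp only [List.length_cons, Nat.add_le_add_iff_right] at hlen
          simp only [halfIsomGo, List.zip_cons_cons]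
          cases hg : d.get? c with
          | none =>
              dsimp only
              rw [ih ds (d.insert c e) hlen (PySem.Dict.nodup_keys_insert d c e hnd)]
              have hnc : d.contains c = false := by
                have := PySem.Dict.contains_eq_isSome_get? (d := d) (k := c)
                rw [hg] at this; simpa using this
              rw [PySem.Dict.items_insert_of_not_contains d e hnc]
              refine okMap_congr ?_
              intro x
              simp only [List.mem_append, List.mem_cons, List.append_assoc]
              tauto
          | some v =>
              dsimp only
              have hmem : (c, v) ∈ d.items := PySem.Dict.mem_items_of_get?_eq_some d hg
              by_cases hv : v = e
              · subst hv
                rw [if_neg (by simp), ih ds d hlen hnd]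
                refine okMap_congr ?_
                intro x
                simp only [List.mem_append, List.mem_cons]
                constructor
                · rintro (h | h)
                  · exact Or.inl h
                  · exact Or.inr (Or.inr h)
                · rintro (h | h | h)
                  · exact Or.inl h
                  · exact Or.inl (h ▸ hmem)
                  · exact Or.inr h
              · rw [if_pos hv]
                simp only [Bool.false_eq_true, false_iff]
                intro hk
                exact hv (hk (c, v) (List.mem_append_left _ hmem) (c, e)
                  (List.mem_append_right _ (List.mem_cons_self)) rfl)

-- the comprehension over range(len s) is zip under Pre_
theorem map_range_eq_zip (ss ts : List Char) (h : ss.length ≤ ts.length) :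
    (List.range ss.length).map (fun i => (ss.getD i ' ', ts.getD i ' ')) = ss.zip ts := by
  apply List.ext_getElem
  · simp [List.length_zip]; omega
  · intro i h1 h2
    have hi : i < ss.length := by simpa using h1
    have hi' : i < ts.length := lt_of_lt_of_le hi h
    simp [List.getD_eq_getElem?_getD, hi, hi', List.getElem_zip]

theorem len_ofList_eq_card {α : Type} [BEq α] [LawfulBEq α] [DecidableEq α] (l : List α) :
    (PySem.Set.ofList l).length = l.toFinset.card := by
  rw [← List.toFinset_card_of_nodup (PySem.Set.nodup_ofList l)]
  congr 1
  apply Finset.ext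
  intro x
  simp [List.mem_toFinset, PySem.Set.mem_ofList]

theorem card_pairs_iff (ps : List (Char × Char)) :
    (PySem.Set.ofList ps).length = (PySem.Set.ofList (ps.map Prod.fst)).length ↔ OkMap ps := by
  have hmap : (ps.map Prod.fst).toFinset = ps.toFinset.image Prod.fst := by
    ext x; simp
  rw [len_ofList_eq_card ps, len_ofList_eq_card (ps.map Prod.fst), hmap, eq_comm,
    Finset.card_image_iff]
  unfold OkMap
  constructor
  · intro h p hp q hq h1
    have := h (List.mem_toFinset.mpr hp) (List.mem_toFinset.mpr hq) h1
    exact congrArg Prod.snd this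
  · intro h p hp q hq h1
    have hp' := List.mem_toFinset.mp hp
    have hq' := List.mem_toFinset.mp hq
    exact Prod.ext h1 (h p hp' q hq' h1)

theorem alt_iff (s t : String) (h : Pre_halfIsom s t) :
    halfIsom_alt s t = true ↔ OkMap (s.toList.zip t.toList) := by
  unfold halfIsom_alt
  simp only [beq_iff_eq, PySem.Set.len, Int.natCast_inj]
  rw [map_range_eq_zip _ _ h]
  have hc := card_pairs_iff (s.toList.zip t.toList)
  rw [List.map_fst_zip h] at hc
  exact hc

-- ===== VERDICT (by name: the statement is the Claim_ definition above) =====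
theorem halfIsom_spec : Claim_equal_halfIsom := by
  intro s t _ hpre
  unfold Spec_halfIsom halfIsom
  have hA : halfIsomGo s.toList t.toList PySem.Dict.empty = true ↔ OkMap (s.toList.zip t.toList) := by
    rw [halfIsomGo_iff _ _ _ hpre (by simp [PySem.Dict.keys_empty])]
    exact okMap_congr (by intro x; simp [PySem.Dict.empty])
  have hB := alt_iff s t hpre
  rcases Bool.eq_false_or_eq_true (halfIsomGo s.toList t.toList PySem.Dict.empty) with h | h <;>
  rcases Bool.eq_false_or_eq_true (halfIsom_alt s t) with h' | h' <;>
  simp_all
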